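-- pv_equiv track=rewrite | github.com/Calculator5329/cloud-file-gen | main.py | generate_pattern_board
-- ===== SOURCE A (Python) =====
-- def generate_pattern_board(multiple=[6], startingNumber=6):
--     boardList = []
--     i = 0
--
--     if len(multiple) == 1:
--         while i < 36:
--             boardList.append(startingNumber + i * multiple[0])
--             i += 1
--     elif len(multiple) == 2:
--         while i < 18:
--             boardList.append(startingNumber + i * multiple[0] + i * multiple[1])
--             boardList.append(startingNumber + i * multiple[0] + i * multiple[1] + multiple[0])
--             i += 1
--     elif len(multiple) == 3:
--         while i < 12:
--             boardList.append(startingNumber + i * multiple[0] + i * multiple[1] + i * multiple[2])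
--             boardList.append(startingNumber + i * multiple[0] + i * multiple[1] + i * multiple[2] + multiple[0])
--             boardList.append(startingNumber + i * multiple[0] + i * multiple[1] + i * multiple[2] + multiple[0] + multiple[1])
--             i += 1
--     return boardList
-- ===== SOURCE B (Python) =====
-- def generate_pattern_board(multiple=[6], startingNumber=6):
--     n = len(multiple)
--     if n not in (1, 2, 3):
--         return []
--     total = sum(multiple)
--     prefix = [sum(multiple[:r]) for r in range(n)]
--     return [startingNumber + (j // n) * total + prefix[j % n] for j in range(36)]
-- ===== Notes on version B (the rewrite author's own statement) =====
-- stated objective: alternative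
-- what changed: Replaces A's three length-specific while-loops that build the board block by block with a closed-form position formula: position j gets startingNumber + (j//n)*sum(multiple) + prefix[j%n], computed as one flat map over range(36) with a precomputed prefix-sum table; lengths outside 1..3 give an empty board via a single guard, as in A.
import Mathlib
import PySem

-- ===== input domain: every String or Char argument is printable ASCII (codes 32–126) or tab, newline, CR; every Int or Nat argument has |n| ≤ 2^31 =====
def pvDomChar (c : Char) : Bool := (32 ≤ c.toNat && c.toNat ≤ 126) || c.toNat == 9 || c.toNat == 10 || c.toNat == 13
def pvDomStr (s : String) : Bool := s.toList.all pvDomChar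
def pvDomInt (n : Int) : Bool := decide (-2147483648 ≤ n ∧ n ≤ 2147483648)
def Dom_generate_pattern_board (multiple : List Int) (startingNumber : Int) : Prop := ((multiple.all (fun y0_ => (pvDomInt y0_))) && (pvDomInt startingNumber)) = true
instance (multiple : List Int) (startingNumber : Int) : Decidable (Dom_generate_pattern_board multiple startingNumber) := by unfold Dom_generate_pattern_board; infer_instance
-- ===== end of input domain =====

-- B replaces A's three block-building while-loop branches with a closed-form per-position formula over a prefix-sum table (alternative algorithm; same cost).


-- ===== PORT A =====
-- literal port of A: three branches on len(multiple); each while-loop is a fold over its range,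
-- appending the same expressions.  multiple[k] is in range under each branch's guard, so
-- (pyGet? multiple k).getD 0 is exact there.
def generate_pattern_board (multiple : List Int) (startingNumber : Int) : List Int :=
  let m : Int → Int := fun k => (PySem.List.pyGet? multiple k).getD 0
  if multiple.length = 1 then
    (List.range 36).foldl (fun bl (i : ℕ) =>
      bl ++ [startingNumber + (i : Int) * m 0]) []
  else if multiple.length = 2 then
    (List.range 18).foldl (fun bl (i : ℕ) =>
      bl ++ [startingNumber + (i : Int) * m 0 + (i : Int) * m 1,
             startingNumber + (i : Int) * m 0 + (i : Int) * m 1 + m 0]) []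
  else if multiple.length = 3 then
    (List.range 12).foldl (fun bl (i : ℕ) =>
      bl ++ [startingNumber + (i : Int) * m 0 + (i : Int) * m 1 + (i : Int) * m 2,
             startingNumber + (i : Int) * m 0 + (i : Int) * m 1 + (i : Int) * m 2 + m 0,
             startingNumber + (i : Int) * m 0 + (i : Int) * m 1 + (i : Int) * m 2 + m 0 + m 1]) []
  else []

-- ===== PORT B =====
-- literal port of Source B: one guard, a prefix-sum table, and one flat map over the 36 positions
-- computing each value from j by the closed-form div/mod formula.
def generate_pattern_board_alt (multiple : List Int) (startingNumber : Int) : List Int :=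
  let n := multiple.length
  if n = 1 ∨ n = 2 ∨ n = 3 then
    let total := multiple.sum
    let pres := (List.range n).map (fun r => (multiple.take r).sum)
    (List.range 36).map (fun (j : ℕ) =>
      startingNumber + ((j / n : ℕ) : Int) * total + pres.getD (j % n) 0)
  else []

-- ===== PRECONDITION & SPEC =====
def Spec_generate_pattern_board (multiple : List Int) (startingNumber : Int) (out : List Int) : Prop := out = generate_pattern_board_alt multiple startingNumber
instance (multiple : List Int) (startingNumber : Int) (out : List Int) : Decidable (Spec_generate_pattern_board multiple startingNumber out) := by unfold Spec_generate_pattern_board; infer_instance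

-- ===== CLAIM (what is proved, stated in full; the proofs are below) =====
def Claim_equal_generate_pattern_board : Prop := ∀ (multiple : List Int) (startingNumber : Int), Dom_generate_pattern_board multiple startingNumber → Spec_generate_pattern_board multiple startingNumber (generate_pattern_board multiple startingNumber)

-- ===== LEMMAS AND PROOFS =====

lemma gpb_one (a s : Int) :
    generate_pattern_board [a] s = generate_pattern_board_alt [a] s := by
  simp only [generate_pattern_board, generate_pattern_board_alt, List.length_cons,
    List.length_nil]
  norm_num [List.range_succ, PySem.List.pyGet?, PySem.List.pyIdx?]

lemma gpb_two (a b s : Int) :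
    generate_pattern_board [a, b] s = generate_pattern_board_alt [a, b] s := by
  simp only [generate_pattern_board, generate_pattern_board_alt, List.length_cons,
    List.length_nil]
  norm_num [List.range_succ, PySem.List.pyGet?, PySem.List.pyIdx?]
  ring_nf
  norm_num

lemma gpb_three (a b c s : Int) :
    generate_pattern_board [a, b, c] s = generate_pattern_board_alt [a, b, c] s := by
  simp only [generate_pattern_board, generate_pattern_board_alt, List.length_cons,
    List.length_nil]
  norm_num [List.range_succ, PySem.List.pyGet?, PySem.List.pyIdx?, show Int.toNat 2 = 2 from rfl]
  ring_nf
  norm_num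

-- ===== VERDICT (by name: the statement is the Claim_ definition above) =====
theorem generate_pattern_board_spec : Claim_equal_generate_pattern_board := by
  intro multiple s _
  unfold Spec_generate_pattern_board
  match multiple with
  | [] =>
    simp [generate_pattern_board, generate_pattern_board_alt]
  | [a] => exact gpb_one a s
  | [a, b] => exact gpb_two a b s
  | [a, b, c] => exact gpb_three a b c s
  | a :: b :: c :: d :: t =>
    simp [generate_pattern_board, generate_pattern_board_alt]
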